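-- pv_equiv track=rewrite | github.com/xanderjjj/golf_rounds | main.py | sizes
-- ===== SOURCE A (Python) =====
-- def sizes(size, min, max):
--     # single group case
--     if size <= max:
--         return [size]
--
--     s = size
--     l = []
--
--     # divisible group case
--     if size % max >= min or size % max == 0:
--         while s >= max:
--             s = s - max
--             l.append(max)
--         if s > 0:
--             l.append(s)
--         return sorted(l)
--
--     # normalised group case
--     while s >= min:
--         s = s - min
--         l.append(min)
--     if s >= min - 1:
--         l.append(s)
--         s = 0
--     if s < min and s > 0:
--         l[-1] = l[-1] + s
--     if len([x for x in l if x == min]) - 1 >= l[-1]: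
--         r = l[-1]
--         del l[-1]
--         for i in range(0, r):
--             l[i] = l[i] + 1
--     return sorted(l)
-- ===== SOURCE B (Python) =====
-- def sizes(size, min, max):
--     # single group case
--     if size <= max:
--         return [size]
--
--     # divisible group case: closed form, already in sorted order
--     q, r = divmod(size, max)
--     if r >= min or r == 0:
--         return ([r] if r > 0 else []) + [max] * q
--
--     # normalised group case: closed form per remainder shape
--     q, r = divmod(size, min)
--     if r == min - 1:
--         if q >= min:
--             return [min] * (q - min + 1) + [min + 1] * (min - 1)
--         return [min - 1] + [min] * q
--     if r == 0:
--         if q - 1 >= min: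
--             return [min] * (q - 1 - min) + [min + 1] * min
--         return [min] * q
--     # 0 < r < min - 1: the leftover is merged into one oversized group,
--     # redistributed one-by-one when enough min-groups exist
--     if q - 2 >= min + r:
--         return [min] * (q - 1 - min - r) + [min + 1] * (min + r)
--     return [min] * (q - 1) + [min + r]
-- ===== Notes on version B (the rewrite author's own statement) =====
-- stated objective: faster
-- what changed: Replaces A's repeated-subtraction while-loops, the in-place remainder surgery (append/merge/delete-and-redistribute) and the final sort by a single divmod and a closed-form case analysis that constructs each answer directly in sorted order.
-- outside the precondition, e.g. on sizes(-2, -1, -3): A returns [], B returns [-1, -1]; on sizes(-1, 0, -3): A returns [], B raises ZeroDivisionError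
import Mathlib
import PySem

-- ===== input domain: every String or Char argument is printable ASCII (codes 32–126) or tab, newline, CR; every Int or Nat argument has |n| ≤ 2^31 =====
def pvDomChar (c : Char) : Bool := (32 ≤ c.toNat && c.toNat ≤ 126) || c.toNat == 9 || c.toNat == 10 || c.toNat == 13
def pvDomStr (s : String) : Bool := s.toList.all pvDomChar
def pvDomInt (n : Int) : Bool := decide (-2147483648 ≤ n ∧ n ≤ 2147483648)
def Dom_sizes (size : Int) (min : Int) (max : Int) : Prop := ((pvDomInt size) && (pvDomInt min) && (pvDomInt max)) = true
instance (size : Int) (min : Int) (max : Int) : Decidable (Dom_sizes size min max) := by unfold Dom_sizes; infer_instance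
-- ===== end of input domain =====

-- B replaces A's repeated-subtraction loops, in-place remainder surgery and final sort by a
-- direct divmod case analysis that writes each result down already in sorted order (objective: faster).

-- ===== PORT A =====
-- the 'while s >= m: s = s - m; l.append(m)' loop (used with m = max and m = min);
-- the '1 ≤ m' guard only makes the recursion total: Python diverges there, outside Pre_sizes
def sizesLoop (m : Int) (s : Int) (l : List Int) : Int × List Int :=
  if _h : 1 ≤ m ∧ m ≤ s then sizesLoop m (s - m) (l ++ [m]) else (s, l)
termination_by s.toNat
decreasing_by omega

def sizesBump (r : Int) (l : List Int) : List Int :=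
  (PySem.List.pyRange 0 r 1).foldl (fun acc i => acc.set i.toNat (acc.getD i.toNat 0 + 1)) l

def sizes (size : Int) (min : Int) (max : Int) : List Int :=
  if size ≤ max then [size]
  else
    let s : Int := size
    let l : List Int := []
    if PySem.Int.mod size max ≥ min ∨ PySem.Int.mod size max = 0 then
      let p := sizesLoop max s l
      let s := p.1
      let l := p.2
      let l := if s > 0 then l ++ [s] else l
      PySem.List.sorted l (fun x => x) false
    else
      let p := sizesLoop min s l
      let s := p.1
      let l := p.2
      let l := if s ≥ min - 1 then l ++ [s] else l
      let s := if s ≥ min - 1 then (0 : Int) else s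
      let l := if s < min ∧ s > 0 then l.dropLast ++ [l.getLast?.getD 0 + s] else l
      let l :=
        if ((l.filter (fun x => x == min)).length : Int) - 1 ≥ l.getLast?.getD 0 then
          sizesBump (l.getLast?.getD 0) l.dropLast
        else l
      PySem.List.sorted l (fun x => x) false

def sizes_alt (size : Int) (min : Int) (max : Int) : List Int :=
  if size ≤ max then [size]
  else
    let q := PySem.Int.floordiv size max
    let r := PySem.Int.mod size max
    if r ≥ min ∨ r = 0 then
      (if r > 0 then [r] else []) ++ List.replicate q.toNat max
    else
      let q := PySem.Int.floordiv size min
      let r := PySem.Int.mod size min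
      if r = min - 1 then
        if q ≥ min then
          List.replicate (q - min + 1).toNat min ++ List.replicate (min - 1).toNat (min + 1)
        else [min - 1] ++ List.replicate q.toNat min
      else if r = 0 then
        if q - 1 ≥ min then
          List.replicate (q - 1 - min).toNat min ++ List.replicate min.toNat (min + 1)
        else List.replicate q.toNat min
      else
        if q - 2 ≥ min + r then
          List.replicate (q - 1 - min - r).toNat min ++ List.replicate (min + r).toNat (min + 1)
        else List.replicate (q - 1).toNat min ++ [min + r]


-- ===== PRECONDITION & SPEC =====
-- Pre_ excludes exactly the inputs on which A does not return normally (max = 0 raises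
-- ZeroDivisionError; max < 0 under the divisible condition, or min ≤ 0 on the normalised
-- branch, loops forever; size < min - 1 on the normalised branch raises IndexError on l[-1])
-- plus the degenerate corners with max < 0 and min ≤ 0 where A's accidental empty-list value
-- comes from leftover loop state (see cites) — B's natural arithmetic differs or raises there.
def Pre_sizes (size : Int) (min : Int) (max : Int) : Prop :=
  size ≤ max ∨
    (max ≠ 0 ∧
      ((PySem.Int.mod size max ≥ min ∨ PySem.Int.mod size max = 0) ∧ 1 ≤ max ∨
        ¬(PySem.Int.mod size max ≥ min ∨ PySem.Int.mod size max = 0) ∧ 1 ≤ min ∧ min - 1 ≤ size))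
instance (size : Int) (min : Int) (max : Int) : Decidable (Pre_sizes size min max) := by
  unfold Pre_sizes; infer_instance

def pvWitness_sizes : Int × Int × Int := (17, 3, 5)

def Spec_sizes (size : Int) (min : Int) (max : Int) (out : List Int) : Prop := out = sizes_alt size min max
instance (size : Int) (min : Int) (max : Int) (out : List Int) : Decidable (Spec_sizes size min max out) := by unfold Spec_sizes; infer_instance

-- ===== CLAIM (what is proved, stated in full; the proofs are below) =====
def Claim_equal_sizes : Prop := ∀ (size : Int) (min : Int) (max : Int), Dom_sizes size min max → Pre_sizes size min max → Spec_sizes size min max (sizes size min max)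

-- ===== LEMMAS AND PROOFS =====

theorem sizesLoop_spec (m : Int) (hm : 1 ≤ m) :
    ∀ (n : Nat) (s : Int), s.toNat ≤ n → 0 ≤ s → ∀ (l : List Int),
      sizesLoop m s l = (PySem.Int.mod s m, l ++ List.replicate (PySem.Int.floordiv s m).toNat m) := by
  have hmodeq : ∀ a : Int, PySem.Int.mod a m = a % m :=
    fun a => PySem.Int.mod_eq_emod_of_pos (by omega)
  have hdiveq : ∀ a : Int, PySem.Int.floordiv a m = a / m :=
    fun a => PySem.Int.floordiv_eq_ediv_of_pos (by omega)
  intro n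
  induction n with
  | zero =>
    intro s hsn hs l
    have hs0 : s = 0 := by omega
    subst hs0
    rw [sizesLoop]
    simp [show ¬(1 ≤ m ∧ m ≤ 0) from by omega, hmodeq, hdiveq]
  | succ n ih =>
    intro s hsn hs l
    rw [sizesLoop]
    by_cases hc : m ≤ s
    · simp only [dif_pos (And.intro hm hc)]
      rw [ih (s - m) (by omega) (by omega)]
      have hmod : PySem.Int.mod (s - m) m = PySem.Int.mod s m := by
        rw [hmodeq, hmodeq]; exact Int.sub_emod_right s m
      have hdiv : PySem.Int.floordiv s m = PySem.Int.floordiv (s - m) m + 1 := by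
        rw [hdiveq, hdiveq]
        have := Int.add_mul_ediv_right (s - m) 1 (show m ≠ 0 by omega)
        simp at this
        rw [← this]
      have hnn : 0 ≤ PySem.Int.floordiv (s - m) m := by
        rw [hdiveq]; exact Int.ediv_nonneg (by omega) (by omega)
      rw [hmod, hdiv]
      have h3 : (PySem.Int.floordiv (s - m) m + 1).toNat = (PySem.Int.floordiv (s - m) m).toNat + 1 := by omega
      rw [h3, List.replicate_succ, List.append_assoc]
      simp
    · simp only [dif_neg (by omega : ¬(1 ≤ m ∧ m ≤ s))]
      have h1 : PySem.Int.mod s m = s := by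
        rw [hmodeq]; exact Int.emod_eq_of_lt hs (by omega)
      have h2 : PySem.Int.floordiv s m = 0 := by
        rw [hdiveq]; exact Int.ediv_eq_zero_of_lt (by omega) (by omega)
      rw [h1, h2]
      simp

theorem sizesBump_rep (v : Int) (n : Nat) :
    ∀ (k : Nat), k ≤ n →
      sizesBump (k : Int) (List.replicate n v) =
        List.replicate k (v + 1) ++ List.replicate (n - k) v := by
  intro k
  induction k with
  | zero =>
    intro _
    simp [sizesBump, PySem.List.pyRange_one_eq_nil (by omega : (0:Int) ≤ 0)]
  | succ k ih =>
    intro hk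
    unfold sizesBump
    rw [show ((k + 1 : Nat) : Int) = (k : Int) + 1 by push_cast; ring,
      PySem.List.pyRange_one_succ_right (by positivity), List.foldl_append]
    have := ih (by omega)
    unfold sizesBump at this
    rw [this]
    simp only [List.foldl_cons, List.foldl_nil]
    have hkn : (k : Int).toNat = k := by omega
    rw [hkn]
    have hget : (List.replicate k (v + 1) ++ List.replicate (n - k) v).getD k 0 = v := by
      rw [List.getD_eq_getElem?_getD, List.getElem?_append_right (by simp)]
      simp only [List.length_replicate, Nat.sub_self]
      simp only [List.getElem?_replicate]
      rw [if_pos (by omega : 0 < n - k)]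
      rfl
    rw [hget]
    have hrep : List.replicate (n - k) v = v :: List.replicate (n - (k + 1)) v := by
      rw [← List.replicate_succ]
      congr 1
      omega
    rw [hrep]
    rw [List.set_append_right _ _ (by simp)]
    simp [List.replicate_succ']

theorem sizesBump_rep' (v : Int) (n : Nat) (k : Int) (h0 : 0 ≤ k) (h : k.toNat ≤ n) :
    sizesBump k (List.replicate n v) =
      List.replicate k.toNat (v + 1) ++ List.replicate (n - k.toNat) v := by
  have := sizesBump_rep v n k.toNat h
  rwa [Int.toNat_of_nonneg h0] at this

theorem pairwise_le_rep_rep (a b : Int) (n m : Nat) (h : a ≤ b) :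
    (List.replicate n a ++ List.replicate m b).Pairwise (· ≤ ·) := by
  rw [List.pairwise_append]
  refine ⟨?_, ?_, ?_⟩
  · exact List.pairwise_replicate.mpr (Or.inr le_rfl)
  · exact List.pairwise_replicate.mpr (Or.inr le_rfl)
  · intro x hx y hy
    rw [List.eq_of_mem_replicate hx, List.eq_of_mem_replicate hy]
    exact h

theorem sorted_rep_rep (xs : List Int) (a b : Int) (n m : Nat) (h : a ≤ b)
    (hp : (List.replicate n a ++ List.replicate m b).Perm xs) :
    PySem.List.sorted xs (fun x => x) false = List.replicate n a ++ List.replicate m b :=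
  PySem.List.sorted_id_eq_of_perm_of_pairwise _ _ hp (pairwise_le_rep_rep a b n m h)

theorem filter_beq_rep (v : Int) (n : Nat) :
    (List.replicate n v).filter (fun x => x == v) = List.replicate n v :=
  List.filter_eq_self.mpr (fun a ha => by simp [List.eq_of_mem_replicate ha])

theorem sizes_eq_alt : ∀ (size mn mx : Int),
    (size ≤ mx ∨
      (mx ≠ 0 ∧
        ((PySem.Int.mod size mx ≥ mn ∨ PySem.Int.mod size mx = 0) ∧ 1 ≤ mx ∨
          ¬(PySem.Int.mod size mx ≥ mn ∨ PySem.Int.mod size mx = 0) ∧ 1 ≤ mn ∧ mn - 1 ≤ size))) →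
    sizes size mn mx = sizes_alt size mn mx := by
  intro size mn mx hpre
  by_cases h1 : size ≤ mx
  · simp [sizes, sizes_alt, h1]
  · have hpre' := hpre.resolve_left h1
    obtain ⟨hmx0, hcases⟩ := hpre'
    by_cases hd : PySem.Int.mod size mx ≥ mn ∨ PySem.Int.mod size mx = 0
    · -- divisible branch
      have hmx : 1 ≤ mx := ((hcases.resolve_right (fun h => h.1 hd)).2)
      have hsize : 0 ≤ size := by omega
      rw [sizes, sizes_alt]
      simp only [if_neg h1, if_pos hd]
      rw [sizesLoop_spec mx hmx size.toNat size le_rfl hsize]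
      set q := PySem.Int.floordiv size mx with hq
      set r := PySem.Int.mod size mx with hr
      have hr0 : 0 ≤ r := by rw [hr, PySem.Int.mod_eq_emod_of_pos (by omega)]; exact Int.emod_nonneg size (by omega)
      have hrlt : r < mx := by rw [hr, PySem.Int.mod_eq_emod_of_pos (by omega)]; exact Int.emod_lt_of_pos size (by omega)
      simp only [List.nil_append]
      by_cases hrpos : r > 0
      · rw [if_pos hrpos, if_pos hrpos]
        have : [r] = List.replicate 1 r := by simp
        rw [this]
        exact sorted_rep_rep _ r mx 1 q.toNat (by omega)
          ((List.perm_append_comm).trans (by simp))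
      · rw [if_neg hrpos, if_neg hrpos]
        have := sorted_rep_rep (List.replicate q.toNat mx) mx mx 0 q.toNat le_rfl (by simp)
        simpa using this
    · -- normalised branch
      have hrest := hcases.resolve_left (fun h => hd h.1)
      have hmn : 1 ≤ mn := hrest.2.1
      have hsz : mn - 1 ≤ size := hrest.2.2
      have hsize : 0 ≤ size := by omega
      rw [sizes, sizes_alt]
      simp only [if_neg h1, if_neg hd]
      rw [sizesLoop_spec mn hmn size.toNat size le_rfl hsize]
      rw [PySem.Int.mod_eq_emod_of_pos (show (0:Int) < mn from by omega),
        PySem.Int.floordiv_eq_ediv_of_pos (show (0:Int) < mn from by omega)]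
      obtain ⟨q, hq⟩ : ∃ q, size / mn = q := ⟨_, rfl⟩
      obtain ⟨r, hr⟩ : ∃ r, size % mn = r := ⟨_, rfl⟩
      rw [hq, hr]
      have hr0 : 0 ≤ r := hr ▸ Int.emod_nonneg size (by omega)
      have hrlt : r < mn := hr ▸ Int.emod_lt_of_pos size (by omega)
      have hq0 : 0 ≤ q := hq ▸ Int.ediv_nonneg hsize (by omega)
      have hqr : mn * q + r = size := by rw [← hq, ← hr]; exact Int.ediv_add_emod size mn
      have hqcast : ((q.toNat : Nat) : Int) = q := Int.toNat_of_nonneg hq0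
      simp only [List.nil_append]
      by_cases hS1 : r ≥ mn - 1
      · -- r = mn - 1
        have hreq : r = mn - 1 := by omega
        simp only [if_pos hS1]
        rw [if_neg (by omega : ¬((0:Int) < mn ∧ (0:Int) > 0))]
        rw [List.getLast?_concat]
        have hfil : List.filter (fun x => x == mn) (List.replicate q.toNat mn ++ [r]) =
            List.replicate q.toNat mn := by
          rw [List.filter_append, filter_beq_rep]
          simp [show r ≠ mn from by omega]
        rw [hfil]
        simp only [List.length_replicate, Option.getD_some]
        rw [List.dropLast_concat]
        by_cases hQ : (q.toNat : Int) - 1 ≥ r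
        · rw [if_pos hQ]
          have hqmn : mn ≤ q := by omega
          rw [sizesBump_rep' mn q.toNat r (by omega) (by omega)]
          rw [sorted_rep_rep _ mn (mn + 1) (q.toNat - r.toNat) r.toNat (by omega)
            List.perm_append_comm]
          simp only [if_pos hreq, if_pos hqmn]
          rw [show (q - mn + 1).toNat = q.toNat - r.toNat from by omega,
            show (mn - 1).toNat = r.toNat from by omega]
        · rw [if_neg hQ]
          rw [sorted_rep_rep _ r mn 1 q.toNat (by omega)
            ((List.perm_append_comm).trans (by simp))]
          simp only [if_pos hreq, if_neg (show ¬(q ≥ mn) from by omega)]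
          simp [hreq]
      · -- r < mn - 1
        simp only [if_neg hS1]
        by_cases hrpos : r > 0
        · -- S3 : 0 < r < mn - 1
          rw [if_pos (And.intro hrlt hrpos)]
          have hq1 : 1 ≤ q := by
            rcases (by omega : q = 0 ∨ 1 ≤ q) with h0 | h
            · exfalso; rw [h0] at hqr; simp at hqr; omega
            · exact h
          have hqcast1 : ((q.toNat - 1 : Nat) : Int) = q - 1 := by omega
          have hrepq : List.replicate q.toNat mn = List.replicate (q.toNat - 1) mn ++ [mn] := by
            conv_lhs => rw [show q.toNat = (q.toNat - 1) + 1 from by omega]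
            rw [List.replicate_succ']
          rw [hrepq, List.getLast?_concat, List.dropLast_concat]
          simp only [Option.getD_some]
          have hfil : List.filter (fun x => x == mn) (List.replicate (q.toNat - 1) mn ++ [mn + r]) =
              List.replicate (q.toNat - 1) mn := by
            rw [List.filter_append, filter_beq_rep]
            simp [show mn + r ≠ mn from by omega]
          rw [hfil, List.getLast?_concat]
          simp only [List.length_replicate, Option.getD_some]
          rw [List.dropLast_concat]
          by_cases hQ : ((q.toNat - 1 : Nat) : Int) - 1 ≥ mn + r
          · rw [if_pos hQ]
            rw [sizesBump_rep' mn (q.toNat - 1) (mn + r) (by omega) (by omega)]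
            rw [sorted_rep_rep _ mn (mn + 1) (q.toNat - 1 - (mn + r).toNat) (mn + r).toNat (by omega)
              List.perm_append_comm]
            simp only [if_neg (show ¬(r = mn - 1) from by omega), if_neg (show ¬(r = 0) from by omega),
              if_pos (show q - 2 ≥ mn + r from by omega)]
            rw [show (q - 1 - mn - r).toNat = q.toNat - 1 - (mn + r).toNat from by omega]
          · rw [if_neg hQ]
            rw [show ([mn + r] : List Int) = List.replicate 1 (mn + r) from by simp]
            rw [sorted_rep_rep _ mn (mn + r) (q.toNat - 1) 1 (by omega) (List.Perm.refl _)]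
            simp only [if_neg (show ¬(r = mn - 1) from by omega), if_neg (show ¬(r = 0) from by omega),
              if_neg (show ¬(q - 2 ≥ mn + r) from by omega)]
            simp only [List.replicate_one]
            rw [show (q - 1).toNat = q.toNat - 1 from by omega]
        · -- S2 : r = 0, mn ≥ 2
          have hr00 : r = 0 := by omega
          have hmn2 : 2 ≤ mn := by omega
          rw [if_neg (by omega : ¬(r < mn ∧ r > 0))]
          have hq1 : 1 ≤ q := by
            rcases (by omega : q = 0 ∨ 1 ≤ q) with h0 | h
            · exfalso; rw [h0] at hqr; simp at hqr; omega
            · exact h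
          have hqcast1 : ((q.toNat - 1 : Nat) : Int) = q - 1 := by omega
          have hrepq : List.replicate q.toNat mn = List.replicate (q.toNat - 1) mn ++ [mn] := by
            conv_lhs => rw [show q.toNat = (q.toNat - 1) + 1 from by omega]
            rw [List.replicate_succ']
          rw [filter_beq_rep]
          have hlast : (List.replicate q.toNat mn).getLast?.getD 0 = mn := by
            rw [hrepq, List.getLast?_concat]; rfl
          have hdrop : (List.replicate q.toNat mn).dropLast = List.replicate (q.toNat - 1) mn := by
            rw [hrepq, List.dropLast_concat]
          rw [hlast]
          simp only [List.length_replicate]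
          by_cases hQ : (q.toNat : Int) - 1 ≥ mn
          · rw [if_pos hQ]
            rw [hdrop]
            rw [sizesBump_rep' mn (q.toNat - 1) mn (by omega) (by omega)]
            rw [sorted_rep_rep _ mn (mn + 1) (q.toNat - 1 - mn.toNat) mn.toNat (by omega)
              List.perm_append_comm]
            simp only [if_neg (show ¬(r = mn - 1) from by omega), if_pos hr00,
              if_pos (show q - 1 ≥ mn from by omega)]
            rw [show (q - 1 - mn).toNat = q.toNat - 1 - mn.toNat from by omega]
          · rw [if_neg hQ]
            have := sorted_rep_rep (List.replicate q.toNat mn) mn mn 0 q.toNat le_rfl (by simp)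
            simp only [List.replicate_zero, List.nil_append] at this
            rw [this]
            simp only [if_neg (show ¬(r = mn - 1) from by omega), if_pos hr00,
              if_neg (show ¬(q - 1 ≥ mn) from by omega)]

-- ===== VERDICT (by name: the statement is the Claim_ definition above) =====
theorem sizes_spec : Claim_equal_sizes := by
  intro size mn mx _hdom hpre
  unfold Spec_sizes
  exact sizes_eq_alt size mn mx hpre
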